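-- pv_equiv track=rewrite | github.com/LovingTrain/multi-model-rag | new_embedding.py | expand_batch
-- ===== SOURCE A (Python) =====
-- def expand_batch(batchsize):
--     input_texts = [
--         'Instruct: How to bake a delicious chocolate cake?',
--         'Passage: Baking a chocolate cake involves mixing flour, sugar, cocoa powder, and eggs. First, preheat your oven to 350°F (175°C). Then, grease and flour a 9-inch round baking pan.',
--         'Passage: The history of the Eiffel Tower dates back to the 1889 Exposition Universelle (World\'s Fair) held in Paris.',
--         'This is a standalone sentence without any prefix.'
--     ]
--     # 扩充
--     expanded_texts = [input_texts[i % len(input_texts)] for i in range(batchsize)]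
--     return expanded_texts
-- ===== SOURCE B (Python) =====
-- def expand_batch(batchsize):
--     input_texts = [
--         'Instruct: How to bake a delicious chocolate cake?',
--         'Passage: Baking a chocolate cake involves mixing flour, sugar, cocoa powder, and eggs. First, preheat your oven to 350°F (175°C). Then, grease and flour a 9-inch round baking pan.',
--         'Passage: The history of the Eiffel Tower dates back to the 1889 Exposition Universelle (World\'s Fair) held in Paris.',
--         'This is a standalone sentence without any prefix.'
--     ]
--     n = max(batchsize, 0)
--     reps = (n + 3) // 4
--     return (input_texts * reps)[:n]
-- ===== Notes on version B (the rewrite author's own statement) =====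
-- stated objective: alternative
-- what changed: Replaces the per-index modulo comprehension with bulk list replication: reps = (max(batchsize,0)+3)//4 copies of the four texts, sliced to the first max(batchsize,0) elements.
import Mathlib
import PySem

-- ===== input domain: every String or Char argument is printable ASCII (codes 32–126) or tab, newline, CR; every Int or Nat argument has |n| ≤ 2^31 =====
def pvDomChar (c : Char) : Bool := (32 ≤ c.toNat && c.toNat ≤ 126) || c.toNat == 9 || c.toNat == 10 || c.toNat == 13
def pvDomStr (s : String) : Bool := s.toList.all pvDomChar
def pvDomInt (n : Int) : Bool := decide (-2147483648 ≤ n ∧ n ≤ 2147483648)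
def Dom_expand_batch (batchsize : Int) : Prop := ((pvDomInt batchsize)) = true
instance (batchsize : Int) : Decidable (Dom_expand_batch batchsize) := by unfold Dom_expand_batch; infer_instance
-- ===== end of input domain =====

-- B builds the cyclic batch by bulk list replication plus a slice instead of A's per-index modulo comprehension.

-- the four literal texts, shared verbatim by both ports (a module-level constant of each Python)
def pvTexts : List String := [
  "Instruct: How to bake a delicious chocolate cake?",
  "Passage: Baking a chocolate cake involves mixing flour, sugar, cocoa powder, and eggs. First, preheat your oven to 350°F (175°C). Then, grease and flour a 9-inch round baking pan.",
  "Passage: The history of the Eiffel Tower dates back to the 1889 Exposition Universelle (World's Fair) held in Paris.",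
  "This is a standalone sentence without any prefix."
]

-- ===== PORT A =====
def expand_batch (batchsize : Int) : List String :=
  (PySem.List.pyRange 0 batchsize 1).map
    (fun i => PySem.List.pyGetD pvTexts (PySem.Int.mod i (pvTexts.length : Int)) "")

-- ===== PORT B =====
def expand_batch_alt (batchsize : Int) : List String :=
  let n : Int := max batchsize 0
  let reps : Int := PySem.Int.floordiv (n + 3) 4
  PySem.List.slice (PySem.List.pyRepeat pvTexts reps) none (some n)

-- ===== PRECONDITION & SPEC =====
def Spec_expand_batch (batchsize : Int) (out : List String) : Prop := out = expand_batch_alt batchsize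
instance (batchsize : Int) (out : List String) : Decidable (Spec_expand_batch batchsize out) := by unfold Spec_expand_batch; infer_instance

-- ===== CLAIM (what is proved, stated in full; the proofs are below) =====
def Claim_equal_expand_batch : Prop := ∀ (batchsize : Int), Dom_expand_batch batchsize → Spec_expand_batch batchsize (expand_batch batchsize)

-- ===== LEMMAS AND PROOFS =====

-- indexing into r concatenated copies of xs is indexing xs cyclically
lemma getD_flatten_replicate {α : Type} (xs : List α) (d : α) (r k : Nat)
    (h : k < r * xs.length) :
    ((List.replicate r xs).flatten).getD k d = xs.getD (k % xs.length) d := by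
  induction r generalizing k with
  | zero => omega
  | succ r ih =>
    rw [List.replicate_succ, List.flatten_cons]
    by_cases hk : k < xs.length
    · rw [List.getD_append _ _ _ _ hk, Nat.mod_eq_of_lt hk]
    · push Not at hk
      rw [Nat.succ_mul] at h
      rw [List.getD_append_right _ _ _ _ hk, ih _ (by omega), Nat.mod_eq_sub_mod hk]

theorem expand_batch_eq_alt (b : Int) : expand_batch b = expand_batch_alt b := by
  unfold expand_batch expand_batch_alt
  set n : Nat := b.toNat with hn
  have hmax : max b 0 = ((n : Nat) : Int) := by omega
  have hlen : pvTexts.length = 4 := rfl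
  rw [hmax]
  dsimp only
  have hfd : PySem.Int.floordiv (((n : Nat) : Int) + 3) 4 = (((n + 3) / 4 : Nat) : Int) := by
    rw [show ((n : Nat) : Int) + 3 = ((n + 3 : Nat) : Int) by push_cast; ring,
        show (4 : Int) = ((4 : Nat) : Int) by norm_num,
        PySem.Int.floordiv_natCast]
  rw [hfd]
  rw [PySem.List.pyRange_one, show ((b - 0).toNat) = n from by omega, List.map_map]
  unfold PySem.List.pyRepeat PySem.List.slice
  simp only [Int.toNat_natCast]
  rw [show PySem.List.clampIdx ((List.replicate ((n + 3) / 4) pvTexts).flatten).length ((n : Nat) : Int)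
        = min n ((List.replicate ((n + 3) / 4) pvTexts).flatten).length from by
      simp]
  have hflen : ((List.replicate ((n + 3) / 4) pvTexts).flatten).length = (n + 3) / 4 * 4 := by
    simp [List.length_flatten, List.map_replicate, hlen, List.sum_replicate]
  simp only [List.drop_zero, Nat.sub_zero]
  apply List.ext_getElem
  · simp only [List.length_map, List.length_range, List.length_take, hflen]
    omega
  · intro i hi1 hi2
    simp only [List.length_map, List.length_range] at hi1
    simp only [List.getElem_map, List.getElem_range, Function.comp_apply]
    have hmod : PySem.Int.mod ((0 : Int) + (i : Nat)) ((pvTexts.length : Nat) : Int)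
        = ((i % 4 : Nat) : Int) := by
      rw [show ((0 : Int) + (i : Nat)) = ((i : Nat) : Int) by ring, hlen]
      exact PySem.Int.mod_natCast i 4
    rw [hmod, PySem.List.pyGetD_natCast]
    rw [List.getElem_take]
    rw [← List.getD_eq_getElem _ "" (by rw [hflen]; omega)]
    rw [getD_flatten_replicate pvTexts "" _ _ (by rw [hlen]; omega), hlen]

-- ===== VERDICT (by name: the statement is the Claim_ definition above) =====
theorem expand_batch_spec : Claim_equal_expand_batch := by
  intro b _
  exact expand_batch_eq_alt b
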